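-- pv_equiv track=rewrite | github.com/DarkAlexWang/leetcode | laioffer/658.find-k-closest-elements.py | largestsmallerequal
-- ===== SOURCE A (Python) =====
-- def largestsmallerequal(arr, x):
--     left = 0
--     right = len(arr) - 1
--     while left < right -1:
--         mid = (left + right) // 2
--         if arr[mid] <= x:
--             left = mid
--         else:
--             right = mid
--     if arr[left] <= x:
--         return left
--     elif arr[right] <= x:
--         return right
--     else:
--         return -1
-- ===== SOURCE B (Python) =====
-- def largestsmallerequal(arr, x):
--     def go(left, right):
--         if right - left > 1:
--             mid = (left + right) // 2
--             if arr[mid] <= x: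
--                 return go(mid, right)
--             return go(left, mid)
--         if arr[left] <= x:
--             return left
--         if arr[right] <= x:
--             return right
--         return -1
--     return go(0, len(arr) - 1)
-- ===== Notes on version B (the rewrite author's own statement) =====
-- stated objective: alternative
-- what changed: The iterative shrink-the-bounds loop followed by a separate final left/right check is replaced by a single recursive function whose base case makes the final decision, removing the mutable left/right state and the separate post-loop branch.
import Mathlib
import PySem

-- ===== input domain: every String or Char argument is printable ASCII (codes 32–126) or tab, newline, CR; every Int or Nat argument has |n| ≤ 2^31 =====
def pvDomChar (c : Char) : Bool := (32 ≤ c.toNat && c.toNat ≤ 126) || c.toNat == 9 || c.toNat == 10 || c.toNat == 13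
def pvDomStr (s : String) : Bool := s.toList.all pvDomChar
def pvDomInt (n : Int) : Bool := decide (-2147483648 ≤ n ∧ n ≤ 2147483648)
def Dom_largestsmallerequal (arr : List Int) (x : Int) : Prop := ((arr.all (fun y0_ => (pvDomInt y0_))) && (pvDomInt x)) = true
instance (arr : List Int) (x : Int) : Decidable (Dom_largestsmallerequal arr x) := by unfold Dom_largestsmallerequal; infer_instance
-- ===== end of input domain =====

-- B replaces A's iterative bound-shrinking loop + separate post-loop check by one recursive
-- function whose base case decides; objective: alternative decomposition, same cost.
-- Both Pythons raise IndexError on the empty list; Pre_ excludes it.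

-- ===== PORT A =====
-- the while-loop of A: state (left, right), iterates while left < right - 1;
-- fuel = (right - left).toNat is enough since the gap shrinks by ≥ 1 each step
def lseLoopA (arr : List Int) (x : Int) : Nat → Int → Int → Int × Int
  | 0, left, right => (left, right)
  | fuel + 1, left, right =>
    if left < right - 1 then
      let mid := PySem.Int.floordiv (left + right) 2
      if PySem.List.pyGetD arr mid 0 ≤ x then lseLoopA arr x fuel mid right
      else lseLoopA arr x fuel left mid
    else (left, right)

-- A's final if/elif/else after the loop (indexing total via getD; in range whenever arr ≠ [])
def lseFinishA (arr : List Int) (x : Int) (p : Int × Int) : Int :=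
  if PySem.List.pyGetD arr p.1 0 ≤ x then p.1
  else if PySem.List.pyGetD arr p.2 0 ≤ x then p.2
  else -1

def largestsmallerequal (arr : List Int) (x : Int) : Int :=
  let left : Int := 0
  let right : Int := (arr.length : Int) - 1
  lseFinishA arr x (lseLoopA arr x (right - left).toNat left right)

-- ===== PORT B =====
-- B's single recursive helper go(left, right); the base case makes the decision itself
def lseGoB (arr : List Int) (x : Int) : Nat → Int → Int → Int
  | fuel + 1, left, right =>
    if right - left > 1 then
      let mid := PySem.Int.floordiv (left + right) 2
      if PySem.List.pyGetD arr mid 0 ≤ x then lseGoB arr x fuel mid right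
      else lseGoB arr x fuel left mid
    else
      if PySem.List.pyGetD arr left 0 ≤ x then left
      else if PySem.List.pyGetD arr right 0 ≤ x then right
      else -1
  | 0, left, right =>
    if PySem.List.pyGetD arr left 0 ≤ x then left
    else if PySem.List.pyGetD arr right 0 ≤ x then right
    else -1

def largestsmallerequal_alt (arr : List Int) (x : Int) : Int :=
  lseGoB arr x (((arr.length : Int) - 1 - 0).toNat) 0 ((arr.length : Int) - 1)

-- ===== PRECONDITION & SPEC =====
-- Pre_ excludes the empty list, on which both Pythons raise IndexError
def Pre_largestsmallerequal (arr : List Int) (x : Int) : Prop := arr ≠ []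
instance (arr : List Int) (x : Int) : Decidable (Pre_largestsmallerequal arr x) := by unfold Pre_largestsmallerequal; infer_instance
def pvWitness_largestsmallerequal : List Int × Int := ([1, 3, 5, 7], 4)

def Spec_largestsmallerequal (arr : List Int) (x : Int) (out : Int) : Prop := out = largestsmallerequal_alt arr x
instance (arr : List Int) (x : Int) (out : Int) : Decidable (Spec_largestsmallerequal arr x out) := by unfold Spec_largestsmallerequal; infer_instance

-- ===== CLAIM (what is proved, stated in full; the proofs are below) =====
def Claim_equal_largestsmallerequal : Prop := ∀ (arr : List Int) (x : Int), Dom_largestsmallerequal arr x → Pre_largestsmallerequal arr x → Spec_largestsmallerequal arr x (largestsmallerequal arr x)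

-- ===== LEMMAS AND PROOFS =====

lemma lseGoB_eq_finish_loop (arr : List Int) (x : Int) :
    ∀ (fuel : Nat) (l r : Int), lseGoB arr x fuel l r = lseFinishA arr x (lseLoopA arr x fuel l r) := by
  intro fuel
  induction fuel with
  | zero => intro l r; simp [lseGoB, lseLoopA, lseFinishA]
  | succ n ih =>
    intro l r
    by_cases h : l < r - 1
    · have h' : r - l > 1 := by omega
      simp only [lseGoB, lseLoopA, if_pos h, if_pos h']
      split <;> simp [ih]
    · have h' : ¬ r - l > 1 := by omega
      simp [lseGoB, lseLoopA, if_neg h, if_neg h', lseFinishA]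

-- ===== VERDICT (by name: the statement is the Claim_ definition above) =====
theorem largestsmallerequal_spec : Claim_equal_largestsmallerequal := by
  intro arr x _ _
  unfold Spec_largestsmallerequal largestsmallerequal largestsmallerequal_alt
  simp [lseGoB_eq_finish_loop]
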